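-- pv_equiv track=rewrite | github.com/kameshcodes/Data-Structures-and-Algorithms | Difficulty: Easy/Shop in Candy Store/shop-in-candy-store.py | candyStore
-- ===== SOURCE A (Python) =====
-- def candyStore(candies,N,K):
--     # code here
--     if K == 0:
--         return (sum(candies), sum(candies))
--     if N == 0:
--         return (0, 0)
--
--
--     min_candies = sorted(candies)
--     max_candies = sorted(candies, reverse = True)
--
--     #min price
--     min_price = 0
--     max_price = 0
--     while len(min_candies)>0:
--         max_price+=max_candies.pop(0)
--         min_price+=min_candies.pop(0)
--
--         if len(max_candies) >= K:
--             min_candies = min_candies[:-K]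
--             max_candies = max_candies[:-K]
--         else:
--             break
--
--     return (min_price, max_price)
-- ===== SOURCE B (Python) =====
-- def candyStore(candies, N, K):
--     # One sort, then a closed form: each purchase pays for 1 candy and takes K free,
--     # so t = ceil(n / (K+1)) candies are paid for; min = t cheapest, max = t dearest.
--     if K == 0:
--         s = sum(candies)
--         return (s, s)
--     if N == 0:
--         return (0, 0)
--     srt = sorted(candies)
--     n = len(srt)
--     t = (n + K) // (K + 1)
--     return (sum(srt[:t]), sum(srt[n - t:]))
-- ===== Notes on version B (the rewrite author's own statement) =====
-- stated objective: faster
-- what changed: Replaces A's simulation loop over two lists (pop(0) plus repeated slice copies) with one sort and a closed-form count t of paid candies (sums of the t-element prefix/suffix of the single sorted list); Pre_ excludes K < 0, which is outside the natural buy-1-get-K-free domain and where A's [:-K] slice behaviour is accidental.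
-- outside the precondition, e.g. on candyStore([1, 2, 3], 3, -2): A returns (6, 6), B returns (3, 0); on candyStore([1, 2, 3], 3, -1): A returns (3, 5), B raises ZeroDivisionError
import Mathlib
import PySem

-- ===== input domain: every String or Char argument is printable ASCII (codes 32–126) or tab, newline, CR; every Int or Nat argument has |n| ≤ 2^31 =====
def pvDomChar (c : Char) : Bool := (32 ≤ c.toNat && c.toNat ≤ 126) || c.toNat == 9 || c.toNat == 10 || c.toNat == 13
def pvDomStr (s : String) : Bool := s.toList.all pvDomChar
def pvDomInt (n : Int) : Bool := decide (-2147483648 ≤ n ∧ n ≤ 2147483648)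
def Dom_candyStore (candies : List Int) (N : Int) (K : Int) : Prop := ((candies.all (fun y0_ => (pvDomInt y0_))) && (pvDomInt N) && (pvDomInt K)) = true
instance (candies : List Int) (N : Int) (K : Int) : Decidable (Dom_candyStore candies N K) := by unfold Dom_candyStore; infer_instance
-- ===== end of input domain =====

-- B replaces A's pop(0)/slice simulation loop by one sort plus a closed-form count of paid
-- candies (faster); K < 0 is excluded by Pre_ as outside the natural buy-1-get-K-free domain.

-- termination lemma for the loop port: xs[:b] is never longer than xs
theorem pvSliceToLenLe {α : Type} (xs : List α) (b : Int) :
    (PySem.List.slice xs none (some b)).length ≤ xs.length := by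
  by_cases hb : 0 ≤ b
  · rw [PySem.List.slice_to xs hb]; simp
  · have hb' : b = -(((-b).toNat : Nat) : Int) := by omega
    rw [hb', PySem.List.slice_to_neg_natCast xs (-b).toNat (by omega)]
    simp

-- ===== PORT A =====
-- while len(min_candies) > 0: pop(0) from both lists, then either slice both with [:-K] or
-- break.  In A both lists are sorted copies of 'candies', hence always of equal length, so
-- max_candies.pop(0) is ported inside the same match (the mismatched-length case is
-- unreachable from candyStore; there it returns the accumulators unchanged).
def candyStoreLoop (minC maxC : List Int) (minP maxP : Int) (K : Int) : Int × Int :=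
  match minC, maxC with
  | a :: mtl, b :: xtl =>
      let maxP' := maxP + b
      let minP' := minP + a
      if ((xtl.length : Int)) ≥ K then
        candyStoreLoop (PySem.List.slice mtl none (some (-K)))
                       (PySem.List.slice xtl none (some (-K))) minP' maxP' K
      else (minP', maxP')
  | _, _ => (minP, maxP)
termination_by minC.length
decreasing_by
  exact Nat.lt_succ_of_le (pvSliceToLenLe _ _)

def candyStore (candies : List Int) (N : Int) (K : Int) : List Int :=
  if K = 0 then [candies.sum, candies.sum]
  else if N = 0 then [0, 0]
  else
    let minC := PySem.List.sorted candies (fun x => x) false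
    let maxC := PySem.List.sorted candies (fun x => x) true
    let r := candyStoreLoop minC maxC 0 0 K
    [r.1, r.2]

-- ===== PORT B =====
def candyStore_alt (candies : List Int) (N : Int) (K : Int) : List Int :=
  if K = 0 then
    let s := candies.sum
    [s, s]
  else if N = 0 then [0, 0]
  else
    let srt := PySem.List.sorted candies (fun x => x) false
    let n : Int := srt.length
    let t : Int := PySem.Int.floordiv (n + K) (K + 1)
    [(PySem.List.slice srt none (some t)).sum,
     (PySem.List.slice srt (some (n - t)) none).sum]

-- ===== PRECONDITION & SPEC =====
-- Pre_ excludes K < 0: a negative number of free candies is outside the task's natural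
-- domain (on it A's [:-K] slice behaviour is accidental, and B's division K+1 can be 0).
def Pre_candyStore (candies : List Int) (N : Int) (K : Int) : Prop := 0 ≤ K
instance (candies : List Int) (N : Int) (K : Int) : Decidable (Pre_candyStore candies N K) := by unfold Pre_candyStore; infer_instance
def pvWitness_candyStore : List Int × Int × Int := ([3, 1, 2], 3, 1)

def Spec_candyStore (candies : List Int) (N : Int) (K : Int) (out : List Int) : Prop := out = candyStore_alt candies N K
instance (candies : List Int) (N : Int) (K : Int) (out : List Int) : Decidable (Spec_candyStore candies N K out) := by unfold Spec_candyStore; infer_instance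

-- ===== CLAIM (what is proved, stated in full; the proofs are below) =====
def Claim_equal_candyStore : Prop := ∀ (candies : List Int) (N : Int) (K : Int), Dom_candyStore candies N K → Pre_candyStore candies N K → Spec_candyStore candies N K (candyStore candies N K)

-- ===== LEMMAS AND PROOFS =====

-- the number of paid candies when len(candies) = n and K > 0 (Nat form used by the proofs)
def pvT (n : Nat) (K : Int) : Nat := (n + K.toNat) / (K.toNat + 1)

theorem pvT_le (n : Nat) (K : Int) : pvT n K ≤ n := by
  unfold pvT
  rw [Nat.div_le_iff_le_mul_add_pred (by omega)]
  have h2 : (K.toNat + 1) * n = n + K.toNat * n := by ring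
  have h3 : 0 ≤ K.toNat * n := Nat.zero_le _
  omega

theorem pvT_zero (K : Int) : pvT 0 K = 0 := by
  unfold pvT
  have h1 : 0 + K.toNat = K.toNat := by omega
  rw [h1]
  exact Nat.div_eq_of_lt (by omega)

theorem candyStoreLoop_eq (K : Int) (hKpos : K > 0) :
    ∀ (m : Nat) (xs ys : List Int), xs.length ≤ m → xs.length = ys.length → ∀ p q : Int,
      candyStoreLoop xs ys p q K =
        (p + (xs.take (pvT xs.length K)).sum, q + (ys.take (pvT ys.length K)).sum) := by
  intro m
  induction m with
  | zero =>
      intro xs ys hm hl p q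
      have hx : xs = [] := List.length_eq_zero_iff.mp (by omega)
      have hy : ys = [] := List.length_eq_zero_iff.mp (by omega)
      subst hx; subst hy
      simp [candyStoreLoop, pvT_zero]
  | succ m ih =>
      intro xs ys hm hl p q
      cases xs with
      | nil =>
          cases ys with
          | nil => simp [candyStoreLoop, pvT_zero]
          | cons b xtl => simp at hl
      | cons a mtl =>
          cases ys with
          | nil => simp at hl
          | cons b xtl =>
              have hL : mtl.length = xtl.length := by simpa using hl
              have hm' : mtl.length ≤ m := by simp at hm; omega
              rw [candyStoreLoop]
              by_cases hcond : ((xtl.length : Int)) ≥ K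
              · simp only [hcond, if_pos]
                -- len ≥ K: the slice [:-K] drops the last K elements
                have hk1 : (0:Nat) < K.toNat := by omega
                have hKL : K.toNat ≤ mtl.length := by omega
                have hneg : -K = -((K.toNat : Nat) : Int) := by omega
                rw [hneg, PySem.List.slice_to_neg_natCast mtl K.toNat hk1,
                    PySem.List.slice_to_neg_natCast xtl K.toNat hk1]
                rw [ih (mtl.take (mtl.length - K.toNat)) (xtl.take (xtl.length - K.toNat))
                      (by simp; omega) (by simp; omega)]
                have hlen : (mtl.take (mtl.length - K.toNat)).length = mtl.length - K.toNat := by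
                  simp
                have hlen' : (xtl.take (xtl.length - K.toNat)).length = xtl.length - K.toNat := by
                  simp
                rw [hlen, hlen', List.take_take, List.take_take]
                have ht1 := pvT_le (mtl.length - K.toNat) K
                have ht2 := pvT_le (xtl.length - K.toNat) K
                have hmin1 : min (pvT (mtl.length - K.toNat) K) (mtl.length - K.toNat)
                    = pvT (mtl.length - K.toNat) K := by omega
                have hmin2 : min (pvT (xtl.length - K.toNat) K) (xtl.length - K.toNat)
                    = pvT (xtl.length - K.toNat) K := by omega
                rw [hmin1, hmin2]
                have hstep : ∀ L : Nat, K.toNat ≤ L → pvT (L + 1) K = pvT (L - K.toNat) K + 1 := by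
                  intro L hkL
                  unfold pvT
                  have h1 : L + 1 + K.toNat = (L - K.toNat + K.toNat) + (K.toNat + 1) := by omega
                  rw [h1, Nat.add_div_right _ (by omega)]
                rw [List.length_cons, List.length_cons, hstep mtl.length hKL,
                    hstep xtl.length (by omega), hL]
                simp [List.take_succ_cons]
                constructor <;> ring
              · -- break: remaining length < K; exactly one element was taken
                simp only [hcond, if_neg, not_false_iff]
                have hT1 : ∀ L : Nat, (L:Int) < K → pvT (L + 1) K = 1 := by
                  intro L hLK
                  unfold pvT
                  exact Nat.div_eq_of_lt_le (by omega) (by omega)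
                rw [List.length_cons, List.length_cons,
                    hT1 mtl.length (by omega), hT1 xtl.length (by omega)]
                simp [List.take_succ_cons]

-- sorted(xs, reverse=True) on Int is the reverse of sorted(xs)
theorem pvSortedRevEqReverse (xs : List Int) :
    PySem.List.sorted xs (fun x => x) true = (PySem.List.sorted xs (fun x => x) false).reverse := by
  apply List.Perm.eq_of_pairwise (le := fun a b : Int => b ≤ a)
  · exact fun a b _ _ h1 h2 => le_antisymm h2 h1
  · simpa using PySem.List.sorted_pairwise_rev xs (fun x => x)
  · rw [List.pairwise_reverse]
    simpa using PySem.List.sorted_pairwise xs (fun x => x)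
  · exact ((PySem.List.sorted_perm xs _ _).trans
      (PySem.List.sorted_perm xs _ _).symm).trans (List.reverse_perm _).symm

-- ===== VERDICT (by name: the statement is the Claim_ definition above) =====
theorem candyStore_spec : Claim_equal_candyStore := by
  intro candies N K _ hPre
  unfold Spec_candyStore candyStore candyStore_alt
  by_cases hK : K = 0
  · simp [hK]
  · rw [if_neg hK, if_neg hK]
    have hKpos : K > 0 := lt_of_le_of_ne hPre (Ne.symm hK)
    by_cases hN : N = 0
    · simp [hN]
    · rw [if_neg hN, if_neg hN]
      dsimp only
      set asc := PySem.List.sorted candies (fun x => x) false with hasc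
      have hrev : PySem.List.sorted candies (fun x => x) true = asc.reverse :=
        pvSortedRevEqReverse candies
      rw [hrev]
      set L := asc.length with hLdef
      set T := pvT L K with hTdef
      have hTle : T ≤ L := pvT_le L K
      have hloop := candyStoreLoop_eq K hKpos L asc asc.reverse (le_refl _) (by simp) 0 0
      rw [List.length_reverse] at hloop
      rw [← hLdef, ← hTdef] at hloop
      rw [hloop]
      -- closed form t in B equals the Nat count T
      have ht : PySem.Int.floordiv ((L:Int) + K) (K + 1) = ((T : Nat) : Int) := by
        have h1 : (L:Int) + K = ((L + K.toNat : Nat) : Int) := by omega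
        have h2 : K + 1 = ((K.toNat + 1 : Nat) : Int) := by omega
        rw [h1, h2, PySem.Int.floordiv_natCast]
        rw [hTdef]; unfold pvT; rfl
      rw [ht]
      have hsl1 : PySem.List.slice asc none (some ((T : Nat) : Int)) = asc.take T := by
        rw [PySem.List.slice_to asc (by omega)]
        simp
      have hsl2 : PySem.List.slice asc (some ((L:Int) - ((T:Nat):Int))) none
          = asc.drop (L - T) := by
        have h1 : (L:Int) - ((T:Nat):Int) = ((L - T : Nat) : Int) := by omega
        rw [h1, PySem.List.slice_from_natCast]
      rw [hsl1, hsl2]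
      have htk : asc.reverse.take T = (asc.drop (L - T)).reverse := by
        rw [List.take_reverse]
      rw [htk, List.sum_reverse]
      simp
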